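-- pv_equiv track=rewrite | github.com/robertmuth/Pytorinox | morph.py | _SegementsFromLine
-- ===== SOURCE A (Python) =====
-- from typing import List, Dict, Tuple
--
-- def _SegementsFromLine(w, scan_line) -> Tuple:
--     out = []
--     last_set = False
--     start = None
--     for x, cell in enumerate(scan_line):
--         this_set = cell != " "
--         if this_set != last_set:
--             if this_set:
--                 start = x
--             elif start is not None:
--                 out.append((start, x))
--                 start = None
--         last_set = this_set
--     if not start is None:
--         out.append((start, w))
--     return tuple(out)
-- ===== SOURCE B (Python) =====
-- def _SegementsFromLine(w, scan_line) -> tuple: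
--     n = len(scan_line)
--     out = []
--     i = 0
--     while i < n:
--         if scan_line[i] == ' ':
--             i += 1
--         else:
--             j = i + 1
--             while j < n and scan_line[j] != ' ':
--                 j += 1
--             out.append((i, w if j == n else j))
--             i = j
--     return tuple(out)
-- ===== Notes on version B (the rewrite author's own statement) =====
-- stated objective: simpler
-- what changed: Replaced A's per-character boolean state machine (last_set/start flags with a trailing flush) by a two-pointer scanner that, at each non-space character, scans directly to the end of the run and emits the segment at once.
import Mathlib
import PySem

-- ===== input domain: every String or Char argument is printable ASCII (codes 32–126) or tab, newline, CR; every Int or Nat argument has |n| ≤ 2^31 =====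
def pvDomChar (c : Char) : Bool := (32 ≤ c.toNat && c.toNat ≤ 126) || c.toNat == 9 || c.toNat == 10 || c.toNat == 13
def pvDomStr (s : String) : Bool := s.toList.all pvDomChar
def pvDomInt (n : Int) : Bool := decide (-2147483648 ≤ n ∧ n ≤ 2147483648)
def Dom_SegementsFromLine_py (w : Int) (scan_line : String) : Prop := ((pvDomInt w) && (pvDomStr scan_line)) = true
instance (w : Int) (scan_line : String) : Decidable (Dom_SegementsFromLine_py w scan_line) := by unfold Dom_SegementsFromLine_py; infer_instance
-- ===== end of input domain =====

-- B replaces A's per-character state machine by a two-pointer run scanner (same cost, simpler); return value only.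

-- ===== PORT A =====
-- loop body of A: state = (out, last_set, start)
def pvStepA (st : List (Int × Int) × Bool × Option Int) (p : Int × Char) :
    List (Int × Int) × Bool × Option Int :=
  let this_set := p.2 != ' '
  if this_set != st.2.1 then
    if this_set then (st.1, this_set, some p.1)
    else match st.2.2 with
      | some s => (st.1 ++ [(s, p.1)], this_set, none)
      | none => (st.1, this_set, st.2.2)
  else (st.1, this_set, st.2.2)

-- A's trailing 'if not start is None: out.append((start, w))'
def pvFinalA (w : Int) (st : List (Int × Int) × Bool × Option Int) : List (Int × Int) :=
  match st.2.2 with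
  | some s => st.1 ++ [(s, w)]
  | none => st.1

def SegementsFromLine_py (w : Int) (scan_line : String) : List (Int × Int) :=
  pvFinalA w ((PySem.List.enumerate scan_line.toList 0).foldl pvStepA ([], false, none))

-- ===== PORT B =====
-- inner while loop of B: advance j over non-space chars, return (j, remaining chars)
def pvRunEnd : Int → List Char → Int × List Char
  | j, [] => (j, [])
  | j, c :: rest => if c = ' ' then (j, c :: rest) else pvRunEnd (j + 1) rest

theorem pvRunEnd_len (j : Int) (l : List Char) : (pvRunEnd j l).2.length ≤ l.length := by
  induction l generalizing j with
  | nil => simp [pvRunEnd]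
  | cons c rest ih =>
    simp only [pvRunEnd]
    split
    · simp
    · exact le_trans (ih (j + 1)) (Nat.le_succ _)

-- outer while loop of B, over the remaining characters with their start index
def pvSegGo (w : Int) : Int → List Char → List (Int × Int)
  | i, [] => []
  | i, c :: rest =>
    if c = ' ' then pvSegGo w (i + 1) rest
    else
      let p := pvRunEnd (i + 1) rest
      (i, if p.2.isEmpty then w else p.1) :: pvSegGo w p.1 p.2
  termination_by i l => l.length
  decreasing_by
    · simp
    · exact Nat.lt_succ_of_le (pvRunEnd_len _ _)

def SegementsFromLine_py_alt (w : Int) (scan_line : String) : List (Int × Int) :=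
  pvSegGo w 0 scan_line.toList

-- ===== PRECONDITION & SPEC =====
def Spec_SegementsFromLine_py (w : Int) (scan_line : String) (out : List (Int × Int)) : Prop := out = SegementsFromLine_py_alt w scan_line
instance (w : Int) (scan_line : String) (out : List (Int × Int)) : Decidable (Spec_SegementsFromLine_py w scan_line out) := by unfold Spec_SegementsFromLine_py; infer_instance

-- ===== CLAIM (what is proved, stated in full; the proofs are below) =====
def Claim_equal_SegementsFromLine_py : Prop := ∀ (w : Int) (scan_line : String), Dom_SegementsFromLine_py w scan_line → Spec_SegementsFromLine_py w scan_line (SegementsFromLine_py w scan_line)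

-- ===== LEMMAS AND PROOFS =====

-- Invariant: running A's loop from the "between runs" state yields pvSegGo; from the
-- "inside a run started at s" state it yields the segment for the current run then pvSegGo.
theorem pvMain (w : Int) (l : List Char) : ∀ (i : Int) (out : List (Int × Int)),
    (pvFinalA w ((PySem.List.enumerate l i).foldl pvStepA (out, false, none)) =
      out ++ pvSegGo w i l)
    ∧ ∀ (s : Int),
      pvFinalA w ((PySem.List.enumerate l i).foldl pvStepA (out, true, some s)) =
        out ++ (s, if (pvRunEnd i l).2.isEmpty then w else (pvRunEnd i l).1)
          :: pvSegGo w (pvRunEnd i l).1 (pvRunEnd i l).2 := by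
  induction l with
  | nil =>
    intro i out
    constructor
    · simp [PySem.List.enumerate_nil, pvFinalA, pvSegGo]
    · intro s
      simp [PySem.List.enumerate_nil, pvFinalA, pvRunEnd, pvSegGo]
  | cons c rest ih =>
    intro i out
    constructor
    · by_cases hc : c = ' '
      · simpa [PySem.List.enumerate_cons, pvStepA, hc, pvSegGo] using (ih (i + 1) out).1
      · have hb : (c != ' ') = true := by simp [hc]
        simpa [PySem.List.enumerate_cons, pvStepA, hc, hb, pvSegGo] using (ih (i + 1) out).2 i
    · intro s
      by_cases hc : c = ' '
      · have h := (ih (i + 1) (out ++ [(s, i)])).1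
        simp [PySem.List.enumerate_cons, pvStepA, hc, pvRunEnd, pvSegGo] at h ⊢
        simpa using h
      · have hb : (c != ' ') = true := by simp [hc]
        have h := (ih (i + 1) out).2 s
        simpa [PySem.List.enumerate_cons, pvStepA, hc, hb, pvRunEnd] using h

-- ===== VERDICT (by name: the statement is the Claim_ definition above) =====
theorem SegementsFromLine_py_spec : Claim_equal_SegementsFromLine_py := by
  intro w scan_line _
  unfold Spec_SegementsFromLine_py SegementsFromLine_py SegementsFromLine_py_alt
  simpa using (pvMain w scan_line.toList 0 []).1
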